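-- pv_equiv track=rewrite | github.com/ipetrushenko-softheme/codejam | implementation/29-286A.py | compute
-- ===== SOURCE A (Python) =====
-- def compute(arr):
--     count = 0
--     for our in arr:
--         for their in arr:
--             if our != their:
--                 if our[0] == their[1]:
--                     count += 1
--     return count
-- ===== SOURCE B (Python) =====
-- def compute(arr):
--     freq = {}
--     for e in arr:
--         freq[e[1]] = freq.get(e[1], 0) + 1
--     cnt = {}
--     for e in arr:
--         cnt[e] = cnt.get(e, 0) + 1
--     total = 0
--     for e in arr:
--         total += freq.get(e[0], 0)
--         if e[0] == e[1]:
--             total -= cnt[e]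
--     return total
-- ===== Notes on version B (the rewrite author's own statement) =====
-- stated objective: faster
-- what changed: Replaced the quadratic double loop with one O(n) pass using a frequency table of second components (subtracting the self-match multiplicity for elements with equal components).
import Mathlib
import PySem

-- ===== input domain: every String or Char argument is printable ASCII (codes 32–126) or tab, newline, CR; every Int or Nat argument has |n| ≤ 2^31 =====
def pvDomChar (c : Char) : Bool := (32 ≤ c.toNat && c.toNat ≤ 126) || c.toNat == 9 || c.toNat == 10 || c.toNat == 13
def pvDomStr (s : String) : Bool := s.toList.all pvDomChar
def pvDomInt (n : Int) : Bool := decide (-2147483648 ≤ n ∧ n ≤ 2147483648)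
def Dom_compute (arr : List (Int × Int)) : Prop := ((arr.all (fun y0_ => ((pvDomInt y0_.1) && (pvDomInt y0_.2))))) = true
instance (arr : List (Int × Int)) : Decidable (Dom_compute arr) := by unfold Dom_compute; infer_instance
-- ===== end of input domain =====

-- B replaces A's quadratic double loop by one linear pass over frequency tables (asymptotically faster).

-- ===== PORT A =====
def compute (arr : List (Int × Int)) : Int :=
  arr.foldl (fun count our =>
    arr.foldl (fun count their =>
      if our ≠ their then
        (if our.1 = their.2 then count + 1 else count)
      else count) count) 0

-- ===== PORT B =====
-- cnt[e] lookup is exact via getD: the key e is always present in cnt (e was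
-- inserted while building cnt from the same list), so Python's cnt[e] never raises.
def compute_alt (arr : List (Int × Int)) : Int :=
  let freq : PySem.Dict Int Int :=
    arr.foldl (fun d e => d.insert e.2 (d.getD e.2 0 + 1)) PySem.Dict.empty
  let cnt : PySem.Dict (Int × Int) Int :=
    arr.foldl (fun d e => d.insert e (d.getD e 0 + 1)) PySem.Dict.empty
  arr.foldl (fun total e =>
    let total := total + freq.getD e.1 0
    if e.1 = e.2 then total - cnt.getD e 0 else total) 0

-- ===== PRECONDITION & SPEC =====
def Spec_compute (arr : List (Int × Int)) (out : Int) : Prop := out = compute_alt arr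
instance (arr : List (Int × Int)) (out : Int) : Decidable (Spec_compute arr out) := by unfold Spec_compute; infer_instance

-- ===== CLAIM (what is proved, stated in full; the proofs are below) =====
def Claim_equal_compute : Prop := ∀ (arr : List (Int × Int)), Dom_compute arr → Spec_compute arr (compute arr)

-- ===== LEMMAS AND PROOFS =====

-- per-element count: the non-self matches of a in l, plus the self matches, are all matches
theorem pv_key (a : Int × Int) (l : List (Int × Int)) :
    l.countP (fun t => decide (a ≠ t ∧ a.1 = t.2)) + (if a.1 = a.2 then l.count a else 0)
      = l.countP (fun t => decide (a.1 = t.2)) := by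
  induction l with
  | nil => simp
  | cons x l ih =>
    simp only [List.countP_cons, List.count_cons, decide_eq_true_eq, beq_iff_eq]
    by_cases hax : a = x
    · subst hax
      rw [if_neg (by simp), if_pos rfl]
      by_cases h : a.1 = a.2
      · rw [if_pos h] at ih
        rw [if_pos h, if_pos h]
        omega
      · rw [if_neg h] at ih
        rw [if_neg h, if_neg h]
        omega
    · rw [if_neg (fun hh : x = a => hax hh.symm)]
      simp only [Nat.add_zero]
      by_cases h1 : a.1 = x.2
      · rw [if_pos ⟨hax, h1⟩, if_pos h1]
        omega
      · rw [if_neg (fun hh => h1 hh.2), if_neg h1]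
        omega

-- A's double loop, summed
theorem pv_A_eq (arr : List (Int × Int)) :
    compute arr = (arr.map (fun our =>
      (arr.countP (fun t => decide (our ≠ t ∧ our.1 = t.2)) : Int))).sum := by
  unfold compute
  rw [PySem.List.foldl_congr_mem (g := fun c our =>
        c + (arr.countP (fun t => decide (our ≠ t ∧ our.1 = t.2)) : Int))]
  · rw [PySem.List.foldl_add]; simp
  · intro acc our _
    rw [PySem.List.foldl_congr_mem (g := fun c their =>
          if (our ≠ their ∧ our.1 = their.2) then c + 1 else c)]
    · rw [PySem.List.foldl_ite_add_one]
    · intro c their _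
      by_cases h1 : our = their
      · rw [if_neg (by simp [h1]), if_neg (fun hh => hh.1 h1)]
      · by_cases h2 : our.1 = their.2
        · rw [if_pos h1, if_pos h2, if_pos ⟨h1, h2⟩]
        · rw [if_pos h1, if_neg h2, if_neg (fun hh => h2 hh.2)]

-- B's single pass, summed
theorem pv_B_eq (arr : List (Int × Int)) :
    compute_alt arr = (arr.map (fun e =>
      ((arr.countP (fun t => decide (e.1 = t.2)) : Int)
        - if e.1 = e.2 then (arr.count e : Int) else 0))).sum := by
  unfold compute_alt
  have hfreq : arr.foldl (fun (d : PySem.Dict Int Int) e => d.insert e.2 (d.getD e.2 0 + 1)) PySem.Dict.empty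
      = PySem.Dict.counter (arr.map (fun e => e.2)) := by
    rw [← PySem.Dict.foldl_insert_getD_add_one_eq_counter, List.foldl_map]
  have hcnt : arr.foldl (fun (d : PySem.Dict (Int × Int) Int) e => d.insert e (d.getD e 0 + 1)) PySem.Dict.empty
      = PySem.Dict.counter arr := by
    rw [← PySem.Dict.foldl_insert_getD_add_one_eq_counter]
  simp only [hfreq, hcnt]
  rw [PySem.List.foldl_congr_mem (g := fun total e =>
        total + ((arr.countP (fun t => decide (e.1 = t.2)) : Int)
          - if e.1 = e.2 then (arr.count e : Int) else 0))]
  · rw [PySem.List.foldl_add]; simp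
  · intro acc e _
    simp only [PySem.Dict.getD_counter]
    have hc : ((arr.map (fun e => e.2)).count e.1 : Int) = (arr.countP (fun t => decide (e.1 = t.2)) : Int) := by
      rw [List.count_eq_countP, List.countP_map]
      congr 1
      apply List.countP_congr
      intro t _
      by_cases ht : e.1 = t.2
      · simp [ht]
      · simp [ht, Ne.symm ht]
    rw [hc]
    by_cases h : e.1 = e.2
    · rw [if_pos h, if_pos h]; ring
    · rw [if_neg h, if_neg h]; ring

-- ===== VERDICT (by name: the statement is the Claim_ definition above) =====
theorem compute_spec : Claim_equal_compute := by
  intro arr _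
  unfold Spec_compute
  rw [pv_A_eq, pv_B_eq]
  congr 1
  apply List.map_congr_left
  intro e _
  have hk := pv_key e arr
  by_cases h : e.1 = e.2
  · rw [if_pos h] at hk ⊢
    omega
  · rw [if_neg h] at hk ⊢
    omega
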